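-- pv_equiv track=rewrite | github.com/Ugcyc/OpenSTT | flow_stt/postprocess.py | _apply_spoken_punctuation
-- ===== SOURCE A (Python) =====
-- from typing import List, Tuple
--
-- PUNCTUATION_RULES: List[Tuple[Tuple[str, ...], str]] = [
--     (("new", "paragraph"), "\n\n"),
--     (("new", "line"), "\n"),
--     (("newline",), "\n"),
--     (("comma",), ","),
--     (("period",), "."),
--     (("full", "stop"), "."),
--     (("question", "mark"), "?"),
--     (("exclamation", "mark"), "!"),
--     (("exclamation", "point"), "!"),
-- ]
--
-- def _apply_spoken_punctuation(text: str) -> str: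
--     words = text.split()
--     output: List[str] = []
--     i = 0
--     while i < len(words):
--         matched = False
--         for keys, symbol in PUNCTUATION_RULES:
--             if tuple(w.lower() for w in words[i : i + len(keys)]) == keys:
--                 output.append(symbol)
--                 i += len(keys)
--                 matched = True
--                 break
--         if not matched:
--             output.append(words[i])
--             i += 1
--     return " ".join(output)
-- ===== SOURCE B (Python) =====
-- from typing import Dict, Tuple
--
-- RULES: Dict[Tuple[str, ...], str] = {
--     ("new", "paragraph"): "\n\n",
--     ("new", "line"): "\n",
--     ("newline",): "\n",
--     ("comma",): ",",
--     ("period",): ".",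
--     ("full", "stop"): ".",
--     ("question", "mark"): "?",
--     ("exclamation", "mark"): "!",
--     ("exclamation", "point"): "!",
-- }
--
-- def _apply_spoken_punctuation(text: str) -> str:
--     words = text.split()
--     lower = [w.lower() for w in words]
--     output = []
--     i = 0
--     n = len(words)
--     while i < n:
--         sym = RULES.get(tuple(lower[i:i + 2]))
--         if sym is not None:
--             output.append(sym)
--             i += 2
--         else:
--             sym = RULES.get((lower[i],))
--             if sym is not None:
--                 output.append(sym)
--             else:
--                 output.append(words[i])
--             i += 1
--     return " ".join(output)
-- ===== Notes on version B (the rewrite author's own statement) =====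
-- stated objective: idiomatic
-- what changed: B precomputes the lowercased word list once and replaces A's per-position in-order scan of the rule list with a dict keyed by word tuples probed longest-match-first (2-word window, then 1-word).
import Mathlib
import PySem

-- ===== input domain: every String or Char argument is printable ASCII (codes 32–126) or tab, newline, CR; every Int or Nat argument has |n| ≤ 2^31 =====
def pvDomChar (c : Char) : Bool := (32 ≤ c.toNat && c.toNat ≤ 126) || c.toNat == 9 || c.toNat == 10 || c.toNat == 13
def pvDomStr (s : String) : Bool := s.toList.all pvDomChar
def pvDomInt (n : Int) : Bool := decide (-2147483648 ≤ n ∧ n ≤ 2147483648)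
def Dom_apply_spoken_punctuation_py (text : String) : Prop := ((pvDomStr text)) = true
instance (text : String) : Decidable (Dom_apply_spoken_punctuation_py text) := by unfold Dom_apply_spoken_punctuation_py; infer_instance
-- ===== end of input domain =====

-- B replaces A's per-position in-order scan of the rule list with a precomputed lowercase word
-- list and a dict keyed by word tuples, probed longest-match-first (idiomatic; same behaviour).

-- ===== PORT A =====
def pvRulesA : List (List String × String) :=
  [(["new", "paragraph"], "\n\n"),
   (["new", "line"], "\n"),
   (["newline"], "\n"),
   (["comma"], ","),
   (["period"], "."),
   (["full", "stop"], "."),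
   (["question", "mark"], "?"),
   (["exclamation", "mark"], "!"),
   (["exclamation", "point"], "!")]

-- A's inner 'for keys, symbol in PUNCTUATION_RULES: … break': first rule whose lowered slice equals its keys
def pvFindA : List (List String × String) → List String → Nat → Option (Nat × String)
  | [], _, _ => none
  | (keys, sym) :: rest, words, i =>
      if (PySem.List.slice words (some (i : Int)) (some ((i + keys.length : Nat) : Int))).map PySem.Str.lower = keys
      then some (keys.length, sym)
      else pvFindA rest words i

-- termination helper for A's while loop: every rule advances i by at least 1
lemma pvFindA_pos (words : List String) (i k : Nat) (sym : String)
    (h : pvFindA pvRulesA words i = some (k, sym)) : 0 < k := by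
  simp only [pvRulesA, pvFindA] at h
  split_ifs at h <;> simp_all <;> omega

-- A's 'while i < len(words)' loop; the joined output list
def pvLoopA (words : List String) (i : Nat) : List String :=
  if hi : i < words.length then
    match h2 : pvFindA pvRulesA words i with
    | some (k, sym) => sym :: pvLoopA words (i + k)
    | none => words[i] :: pvLoopA words (i + 1)
  else []
termination_by words.length - i
decreasing_by
  · have := pvFindA_pos words i k sym h2; omega
  · omega

def apply_spoken_punctuation_py (text : String) : String :=
  PySem.Str.join " " (pvLoopA (PySem.Str.split₀ text) 0)

-- ===== PORT B =====
def pvRulesB : PySem.Dict (List String) String :=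
  PySem.Dict.ofList
    [(["new", "paragraph"], "\n\n"),
     (["new", "line"], "\n"),
     (["newline"], "\n"),
     (["comma"], ","),
     (["period"], "."),
     (["full", "stop"], "."),
     (["question", "mark"], "?"),
     (["exclamation", "mark"], "!"),
     (["exclamation", "point"], "!")]

-- B's while loop: probe the dict with the lowered 2-word window, then the 1-word window
def pvLoopB (words lw : List String) (i : Nat) : List String :=
  if hi : i < words.length then
    match pvRulesB.get? (PySem.List.slice lw (some (i : Int)) (some ((i + 2 : Nat) : Int))) with
    | some sym => sym :: pvLoopB words lw (i + 2)
    | none =>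
      match pvRulesB.get? [lw.getD i ""] with
      | some sym => sym :: pvLoopB words lw (i + 1)
      | none => words[i] :: pvLoopB words lw (i + 1)
  else []
termination_by words.length - i
decreasing_by all_goals omega

def apply_spoken_punctuation_py_alt (text : String) : String :=
  let words := PySem.Str.split₀ text
  PySem.Str.join " " (pvLoopB words (words.map PySem.Str.lower) 0)

-- ===== PRECONDITION & SPEC =====
def Spec_apply_spoken_punctuation_py (text : String) (out : String) : Prop := out = apply_spoken_punctuation_py_alt text
instance (text : String) (out : String) : Decidable (Spec_apply_spoken_punctuation_py text out) := by unfold Spec_apply_spoken_punctuation_py; infer_instance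

-- ===== CLAIM (what is proved, stated in full; the proofs are below) =====
def Claim_equal_apply_spoken_punctuation_py : Prop := ∀ (text : String), Dom_apply_spoken_punctuation_py text → Spec_apply_spoken_punctuation_py text (apply_spoken_punctuation_py text)

-- ===== LEMMAS AND PROOFS =====

lemma pvSlice_nat (xs : List String) (i n : Nat) :
    PySem.List.slice xs (some (i : Int)) (some ((i + n : Nat) : Int)) = (xs.drop i).take n := by
  push_cast
  rw [PySem.List.slice_natCast_add]

lemma pvRulesB_get? (k : List String) :
    pvRulesB.get? k =
      if k = ["new", "paragraph"] then some "\n\n"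
      else if k = ["new", "line"] then some "\n"
      else if k = ["newline"] then some "\n"
      else if k = ["comma"] then some ","
      else if k = ["period"] then some "."
      else if k = ["full", "stop"] then some "."
      else if k = ["question", "mark"] then some "?"
      else if k = ["exclamation", "mark"] then some "!"
      else if k = ["exclamation", "point"] then some "!"
      else none := by
  simp only [pvRulesB, PySem.Dict.ofList, PySem.Dict.get?, PySem.Dict.update, PySem.Dict.insert,
    PySem.Dict.contains, PySem.Dict.empty]
  split_ifs <;> simp_all
  rename_i h1 h2 h3 h4 h5 h6 h7 h8 h9
  exact ⟨mt Eq.symm h1, mt Eq.symm h2, mt Eq.symm h3, mt Eq.symm h4, mt Eq.symm h5,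
    mt Eq.symm h6, mt Eq.symm h7, mt Eq.symm h8, mt Eq.symm h9⟩

lemma pvRulesB_get2 (x y : String) :
    pvRulesB.get? [x, y] =
      if x = "new" ∧ y = "paragraph" then some "\n\n"
      else if x = "new" ∧ y = "line" then some "\n"
      else if x = "full" ∧ y = "stop" then some "."
      else if x = "question" ∧ y = "mark" then some "?"
      else if x = "exclamation" ∧ y = "mark" then some "!"
      else if x = "exclamation" ∧ y = "point" then some "!"
      else none := by
  rw [pvRulesB_get?]
  simp

lemma pvRulesB_get1 (x : String) :
    pvRulesB.get? [x] =
      if x = "newline" then some "\n"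
      else if x = "comma" then some ","
      else if x = "period" then some "."
      else none := by
  rw [pvRulesB_get?]
  simp

lemma pvFindA_eq2 (words : List String) (i : Nat) (w w' : String) (rest : List String)
    (hd : words.drop i = w :: w' :: rest) :
    pvFindA pvRulesA words i =
      if PySem.Str.lower w = "new" ∧ PySem.Str.lower w' = "paragraph" then some (2, "\n\n")
      else if PySem.Str.lower w = "new" ∧ PySem.Str.lower w' = "line" then some (2, "\n")
      else if PySem.Str.lower w = "newline" then some (1, "\n")
      else if PySem.Str.lower w = "comma" then some (1, ",")
      else if PySem.Str.lower w = "period" then some (1, ".")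
      else if PySem.Str.lower w = "full" ∧ PySem.Str.lower w' = "stop" then some (2, ".")
      else if PySem.Str.lower w = "question" ∧ PySem.Str.lower w' = "mark" then some (2, "?")
      else if PySem.Str.lower w = "exclamation" ∧ PySem.Str.lower w' = "mark" then some (2, "!")
      else if PySem.Str.lower w = "exclamation" ∧ PySem.Str.lower w' = "point" then some (2, "!")
      else none := by
  simp only [pvFindA, pvRulesA, pvSlice_nat, hd]
  simp

lemma pvFindA_eq1 (words : List String) (i : Nat) (w : String)
    (hd : words.drop i = [w]) :
    pvFindA pvRulesA words i =
      if PySem.Str.lower w = "newline" then some (1, "\n")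
      else if PySem.Str.lower w = "comma" then some (1, ",")
      else if PySem.Str.lower w = "period" then some (1, ".")
      else none := by
  simp only [pvFindA, pvRulesA, pvSlice_nat, hd]
  simp

set_option maxHeartbeats 1000000 in
lemma pvLoop_eq (words : List String) :
    ∀ m i, words.length - i ≤ m →
      pvLoopA words i = pvLoopB words (words.map PySem.Str.lower) i := by
  intro m
  induction m with
  | zero =>
    intro i h
    have hi : ¬ i < words.length := by omega
    rw [pvLoopA, pvLoopB]
    simp [hi]
  | succ m ih =>
    intro i h
    by_cases hi : i < words.length
    · have ih1 : pvLoopA words (i + 1) = pvLoopB words (words.map PySem.Str.lower) (i + 1) :=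
        ih (i + 1) (by omega)
      have ih2 : pvLoopA words (i + 2) = pvLoopB words (words.map PySem.Str.lower) (i + 2) :=
        ih (i + 2) (by omega)
      have hget : (words.map PySem.Str.lower).getD i "" = PySem.Str.lower words[i] := by
        simp [List.getD, List.getElem?_map, List.getElem?_eq_getElem hi]
      rw [pvLoopA, pvLoopB]
      by_cases hj : i + 1 < words.length
      · have hd : words.drop i = words[i] :: words[i + 1] :: words.drop (i + 2) := by
          rw [List.drop_eq_getElem_cons hi, List.drop_eq_getElem_cons hj]
        have hB2 : PySem.List.slice (words.map PySem.Str.lower) (some (i : Int))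
            (some ((i + 2 : Nat) : Int)) =
            [PySem.Str.lower words[i], PySem.Str.lower words[i + 1]] := by
          rw [pvSlice_nat, ← List.map_drop, hd]
          rfl
        simp only [hi, dif_pos, hB2, hget, pvRulesB_get2, pvRulesB_get1]
        split
        · rename_i k sym heq
          rw [pvFindA_eq2 words i _ _ _ hd] at heq
          clear ih h hd hB2 hget
          split_ifs at heq <;> simp_all
        · rename_i heq
          rw [pvFindA_eq2 words i _ _ _ hd] at heq
          clear ih h hd hB2 hget
          split_ifs at heq
          try simp_all
          split_ifs <;> simp_all
      · have hd : words.drop i = [words[i]] := by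
          rw [List.drop_eq_getElem_cons hi, List.drop_eq_nil_of_le (by omega : words.length ≤ i + 1)]
        have hB2 : PySem.List.slice (words.map PySem.Str.lower) (some (i : Int))
            (some ((i + 2 : Nat) : Int)) = [PySem.Str.lower words[i]] := by
          rw [pvSlice_nat, ← List.map_drop, hd]
          rfl
        have hend1 : pvLoopA words (i + 1) = [] := by rw [pvLoopA]; simp [hj]
        have hend2 : pvLoopB words (words.map PySem.Str.lower) (i + 2) = [] := by
          rw [pvLoopB]
          simp [show ¬ i + 2 < words.length from by omega]
        have hend3 : pvLoopB words (words.map PySem.Str.lower) (i + 1) = [] := by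
          rw [pvLoopB]; simp [hj]
        simp only [hi, dif_pos, hB2, hget, pvRulesB_get1, hend2, hend3]
        split
        · rename_i k sym heq
          rw [pvFindA_eq1 words i _ hd] at heq
          clear ih h hd hB2 hget
          split_ifs at heq <;> simp_all
        · rename_i heq
          rw [pvFindA_eq1 words i _ hd] at heq
          clear ih h hd hB2 hget
          split_ifs at heq
          simp_all
    · rw [pvLoopA, pvLoopB]
      simp [hi]

-- ===== VERDICT (by name: the statement is the Claim_ definition above) =====
theorem apply_spoken_punctuation_py_spec : Claim_equal_apply_spoken_punctuation_py := by
  intro text _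
  unfold Spec_apply_spoken_punctuation_py apply_spoken_punctuation_py apply_spoken_punctuation_py_alt
  rw [pvLoop_eq _ (PySem.Str.split₀ text).length 0 (by omega)]
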